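-- pv_equiv track=rewrite | github.com/carleb/cyberSecProf | app.py | is_sequential
-- ===== SOURCE A (Python) =====
-- def is_sequential(s):
--     if len(s) < 3:
--         return False
--     ascending = all(
--         ord(next_char) == ord(current_char) + 1
--         for current_char, next_char in zip(s, s[1:])
--     )
--     descending = all(
--         ord(next_char) == ord(current_char) - 1
--         for current_char, next_char in zip(s, s[1:])
--     )
--     return ascending or descending
-- ===== SOURCE B (Python) =====
-- def is_sequential(s):
--     if len(s) < 3:
--         return False
--     step = ord(s[1]) - ord(s[0])
--     if step != 1 and step != -1:
--         return False
--     return all(ord(n) - ord(c) == step for c, n in zip(s, s[1:]))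
-- ===== Notes on version B (the rewrite author's own statement) =====
-- stated objective: simpler
-- what changed: B determines the direction once from the first two characters and makes a single direction-validating pass over adjacent pairs, instead of A's two independent full ascending and descending scans.
import Mathlib
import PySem

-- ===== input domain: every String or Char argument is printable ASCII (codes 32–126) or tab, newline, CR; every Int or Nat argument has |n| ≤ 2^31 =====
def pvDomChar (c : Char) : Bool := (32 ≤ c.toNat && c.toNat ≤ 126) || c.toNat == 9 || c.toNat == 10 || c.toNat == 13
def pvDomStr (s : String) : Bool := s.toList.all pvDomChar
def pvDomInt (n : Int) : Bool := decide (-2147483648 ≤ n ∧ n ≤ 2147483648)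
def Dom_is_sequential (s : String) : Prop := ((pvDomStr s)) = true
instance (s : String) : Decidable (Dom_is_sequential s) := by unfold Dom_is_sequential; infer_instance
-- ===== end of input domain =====

-- B replaces A's two independent ascending/descending scans by one pass whose direction is
-- fixed from the first two characters (objective: simpler); same O(n) cost.


-- ===== PORT A =====
-- A: len<3 guard, then two full passes over adjacent pairs (ascending, descending), or-ed.
def is_sequential (s : String) : Bool :=
  let cs := s.toList
  if cs.length < 3 then false
  else
    let pairs := cs.zip (cs.drop 1)
    let ascending := pairs.all (fun p => (p.2.toNat : Int) == (p.1.toNat : Int) + 1)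
    let descending := pairs.all (fun p => (p.2.toNat : Int) == (p.1.toNat : Int) - 1)
    ascending || descending

-- ===== PORT B =====
-- B: determine the step from the first two characters once; single validating pass.
def is_sequential_alt (s : String) : Bool :=
  let cs := s.toList
  if cs.length < 3 then false
  else
    match cs with
    | c0 :: c1 :: _ =>
      let step : Int := (c1.toNat : Int) - (c0.toNat : Int)
      if step != 1 && step != -1 then false
      else (cs.zip (cs.drop 1)).all (fun p => (p.2.toNat : Int) - (p.1.toNat : Int) == step)
    | _ => false

-- ===== PRECONDITION & SPEC =====
def Spec_is_sequential (s : String) (out : Bool) : Prop := out = is_sequential_alt s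
instance (s : String) (out : Bool) : Decidable (Spec_is_sequential s out) := by unfold Spec_is_sequential; infer_instance

-- ===== CLAIM (what is proved, stated in full; the proofs are below) =====
def Claim_equal_is_sequential : Prop := ∀ (s : String), Dom_is_sequential s → Spec_is_sequential s (is_sequential s)

-- ===== LEMMAS AND PROOFS =====

theorem pv_beq_add (a b : Int) : (a == b + 1) = (a - b == (1:Int)) := by
  by_cases h : a = b + 1 <;> simp [h] <;> try omega

theorem pv_beq_sub (a b : Int) : (a == b - 1) = (a - b == (-1:Int)) := by
  by_cases h : a = b - 1 <;> simp [h] <;> try omega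

-- pointwise-equal predicates give equal `all` results
theorem pv_all_congr {α : Type} (l : List α) (f g : α → Bool)
    (h : ∀ x, f x = g x) : l.all f = l.all g := by
  induction l with
  | nil => rfl
  | cons a l ih => simp [List.all_cons, h a, ih]

theorem pv_eq_lists (cs : List Char) :
    (if cs.length < 3 then false
     else
       let pairs := cs.zip (cs.drop 1)
       let ascending := pairs.all (fun p => (p.2.toNat : Int) == (p.1.toNat : Int) + 1)
       let descending := pairs.all (fun p => (p.2.toNat : Int) == (p.1.toNat : Int) - 1)
       (ascending || descending)) =
    (if cs.length < 3 then false
     else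
       match cs with
       | c0 :: c1 :: _ =>
         let step : Int := (c1.toNat : Int) - (c0.toNat : Int)
         if step != 1 && step != -1 then false
         else (cs.zip (cs.drop 1)).all (fun p => (p.2.toNat : Int) - (p.1.toNat : Int) == step)
       | _ => false) := by
  match cs with
  | [] => rfl
  | [_] => rfl
  | [_, _] => rfl
  | c0 :: c1 :: c2 :: rest =>
    simp only [List.length_cons, if_neg (by omega : ¬ (rest.length + 1 + 1 + 1 < 3))]
    set d : Int := (c1.toNat : Int) - (c0.toNat : Int) with hd
    by_cases h1 : d = 1
    · -- direction ascending: descending fails on the first pair; asc pass = B's pass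
      have hne : ¬ (d != 1 && d != -1) = true := by simp [h1]
      simp only [List.drop_succ_cons, List.drop_zero, List.zip_cons_cons, List.all_cons,
        Bool.if_false_left, h1]
      have hdesc : ((c1.toNat : Int) == (c0.toNat : Int) - 1) = false := by
        simp; omega
      have hasc1 : ((c1.toNat : Int) == (c0.toNat : Int) + 1) = true := by
        simp; omega
      have hfirst : ((c1.toNat : Int) - (c0.toNat : Int) == (1:Int)) = true := by
        simp; omega
      rw [hdesc, hasc1, hfirst]
      simp only [Bool.false_and, Bool.or_false, Bool.true_and]
      rw [pv_beq_add ((c2.toNat : Int)) ((c1.toNat : Int)),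
        pv_all_congr ((c2 :: rest).zip rest) _ _
          (fun (p : Char × Char) => pv_beq_add ((p.2.toNat : Int)) ((p.1.toNat : Int)))]
      norm_num
    · by_cases h2 : d = -1
      · -- direction descending
        have hne : ¬ (d != 1 && d != -1) = true := by simp [h2]
        simp only [List.drop_succ_cons, List.drop_zero, List.zip_cons_cons, List.all_cons,
          h2]
        have hasc : ((c1.toNat : Int) == (c0.toNat : Int) + 1) = false := by
          simp; omega
        have hdesc1 : ((c1.toNat : Int) == (c0.toNat : Int) - 1) = true := by
          simp; omega
        have hfirst : ((c1.toNat : Int) - (c0.toNat : Int) == (-1:Int)) = true := by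
          simp; omega
        rw [hasc, hdesc1, hfirst]
        simp only [Bool.false_and, Bool.false_or, Bool.true_and]
        rw [pv_beq_sub ((c2.toNat : Int)) ((c1.toNat : Int)),
          pv_all_congr ((c2 :: rest).zip rest) _ _
            (fun (p : Char × Char) => pv_beq_sub ((p.2.toNat : Int)) ((p.1.toNat : Int)))]
        norm_num
      · -- neither: both sides false on the first pair
        have hne : (d != 1 && d != -1) = true := by simp [h1, h2]
        simp only [List.drop_succ_cons, List.drop_zero, List.zip_cons_cons, List.all_cons,
          if_pos hne]
        have hasc : ((c1.toNat : Int) == (c0.toNat : Int) + 1) = false := by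
          simp; omega
        have hdesc : ((c1.toNat : Int) == (c0.toNat : Int) - 1) = false := by
          simp; omega
        rw [hasc, hdesc]
        simp

-- ===== VERDICT (by name: the statement is the Claim_ definition above) =====
theorem is_sequential_spec : Claim_equal_is_sequential := by
  intro s _
  show is_sequential s = is_sequential_alt s
  unfold is_sequential is_sequential_alt
  exact pv_eq_lists s.toList
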